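-- pv_equiv track=rewrite | github.com/recipi/recipi | src/recipi/utils/nldate.py | join_tags
-- ===== SOURCE A (Python) =====
-- def join_tags(tags):
--     result = []
--     buffer = []
--     for item in tags:
--         if item[1] == 'join':
--             buffer.append(item[0])
--         else:
--             if buffer:
--                 result.append((u' '.join(buffer), 'detail'))
--                 buffer = []
--             result.append(item)
--     if buffer:
--         result.append((u' '.join(buffer), 'detail'))
--
--     return result
-- ===== SOURCE B (Python) =====
-- from itertools import groupby
--
-- def join_tags(tags):
--     result = []
--     for is_join, group in groupby(tags, key=lambda it: it[1] == 'join'):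
--         if is_join:
--             result.append((u' '.join(x[0] for x in group), 'detail'))
--         else:
--             for item in group:
--                 result.append(item)
--     return result
-- ===== Notes on version B (the rewrite author's own statement) =====
-- stated objective: idiomatic
-- what changed: Replaces A's flush-on-mismatch buffer state machine with itertools.groupby: the input is split up front into maximal runs of join/non-join items, each join run is emitted as one 'detail' tuple and non-join runs are copied through.
import Mathlib
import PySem

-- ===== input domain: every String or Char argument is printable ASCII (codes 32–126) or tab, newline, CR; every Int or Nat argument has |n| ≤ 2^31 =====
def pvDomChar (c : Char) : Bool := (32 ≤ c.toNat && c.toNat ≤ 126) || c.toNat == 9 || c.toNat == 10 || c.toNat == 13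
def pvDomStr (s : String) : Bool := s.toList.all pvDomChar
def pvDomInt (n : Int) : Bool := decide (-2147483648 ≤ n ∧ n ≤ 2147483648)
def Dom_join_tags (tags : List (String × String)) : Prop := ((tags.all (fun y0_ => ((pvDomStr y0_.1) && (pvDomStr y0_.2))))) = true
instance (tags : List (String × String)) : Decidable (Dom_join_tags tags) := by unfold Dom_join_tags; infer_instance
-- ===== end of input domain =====

-- B replaces A's flush-on-mismatch buffer state machine with an up-front split into
-- maximal runs (itertools.groupby); objective: idiomatic, same O(n) cost.

-- ===== PORT A =====
-- A's loop threads (result, buffer); on a non-join item the buffer is flushed first.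
def join_tags (tags : List (String × String)) : List (String × String) :=
  let st := tags.foldl
    (fun (st : List (String × String) × List String) item =>
      if item.2 == "join" then (st.1, st.2 ++ [item.1])
      else
        let st1 := if st.2.isEmpty then st
                   else (st.1 ++ [(PySem.Str.join " " st.2, "detail")], ([] : List String))
        (st1.1 ++ [item], st1.2))
    ([], [])
  if st.2.isEmpty then st.1 else st.1 ++ [(PySem.Str.join " " st.2, "detail")]

-- ===== PORT B =====
-- Source B's groupby: each maximal run of 'join'-tagged items becomes one 'detail' tuple,
-- a non-join item is copied through.  takeWhile/dropWhile realise the maximal run.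
def join_tags_alt : List (String × String) → List (String × String)
  | [] => []
  | (s, t) :: rest =>
    if t == "join" then
      (PySem.Str.join " "
          ((((s, t) :: rest).takeWhile (fun it => it.2 == "join")).map Prod.fst), "detail")
        :: join_tags_alt (rest.dropWhile (fun it => it.2 == "join"))
    else (s, t) :: join_tags_alt rest
termination_by tags => tags.length
decreasing_by
  · exact Nat.lt_succ_of_le (List.length_dropWhile_le _ _)
  · simp

-- ===== PRECONDITION & SPEC =====
def Spec_join_tags (tags : List (String × String)) (out : List (String × String)) : Prop := out = join_tags_alt tags
instance (tags : List (String × String)) (out : List (String × String)) : Decidable (Spec_join_tags tags out) := by unfold Spec_join_tags; infer_instance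

-- ===== CLAIM (what is proved, stated in full; the proofs are below) =====
def Claim_equal_join_tags : Prop := ∀ (tags : List (String × String)), Dom_join_tags tags → Spec_join_tags tags (join_tags tags)

-- ===== LEMMAS AND PROOFS =====

-- Common characterisation: result of the remaining input given the pending buffer.
def gspec (buf : List String) : List (String × String) → List (String × String)
  | [] => if buf.isEmpty then [] else [(PySem.Str.join " " buf, "detail")]
  | (s, t) :: rest =>
    if t == "join" then gspec (buf ++ [s]) rest
    else (if buf.isEmpty then [] else [(PySem.Str.join " " buf, "detail")])
         ++ (s, t) :: gspec [] rest

theorem joinA_eq_gspec (tags : List (String × String)) :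
    ∀ (res : List (String × String)) (buf : List String),
    (let st := tags.foldl
      (fun (st : List (String × String) × List String) item =>
        if item.2 == "join" then (st.1, st.2 ++ [item.1])
        else
          let st1 := if st.2.isEmpty then st
                     else (st.1 ++ [(PySem.Str.join " " st.2, "detail")], ([] : List String))
          (st1.1 ++ [item], st1.2))
      (res, buf)
     if st.2.isEmpty then st.1 else st.1 ++ [(PySem.Str.join " " st.2, "detail")])
    = res ++ gspec buf tags := by
  induction tags with
  | nil =>
    intro res buf
    simp only [List.foldl_nil, gspec]
    by_cases h : buf.isEmpty <;> simp [h]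
  | cons hd tl ih =>
    intro res buf
    obtain ⟨s, t⟩ := hd
    by_cases h : t == "join"
    · simp only [List.foldl_cons, gspec, h, if_pos trivial]
      simpa using ih res (buf ++ [s])
    · by_cases hb : buf.isEmpty
      · have hbe : buf = [] := by simpa using hb
        subst hbe
        simp only [List.foldl_cons, gspec, h, hb]
        simpa [h] using ih (res ++ [(s, t)]) []
      · simp only [List.foldl_cons, gspec, h, hb]
        have := ih (res ++ [(PySem.Str.join " " buf, "detail"), (s, t)]) []
        simpa [h, hb, List.append_assoc] using this
  
theorem gspec_run (rest : List (String × String)) :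
    ∀ buf : List String, buf.isEmpty = false →
    gspec buf rest
      = (PySem.Str.join " " (buf ++ (rest.takeWhile (fun it => it.2 == "join")).map Prod.fst),
          "detail")
        :: gspec [] (rest.dropWhile (fun it => it.2 == "join")) := by
  induction rest with
  | nil => intro buf hb; simp [gspec, hb]
  | cons hd tl ih =>
    intro buf hb
    obtain ⟨s, t⟩ := hd
    by_cases h : t == "join"
    · have hb' : (buf ++ [s]).isEmpty = false := by simp
      simp only [gspec, h, if_pos trivial, List.takeWhile_cons, List.dropWhile_cons]
      rw [ih (buf ++ [s]) hb']
      simp [List.append_assoc]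
    · simp [gspec, h, hb]

theorem alt_eq_gspec (tags : List (String × String)) :
    join_tags_alt tags = gspec [] tags := by
  induction tags using join_tags_alt.induct with
  | case1 => simp [join_tags_alt, gspec]
  | case2 s t rest h ih =>
    have h1 : gspec ([] : List String) ((s, t) :: rest) = gspec [s] rest := by
      simp [gspec, h]
    rw [join_tags_alt]
    simp only [h, if_pos trivial]
    rw [h1, gspec_run rest [s] (by simp), ih]
    simp [h]
  | case3 s t rest h ih =>
    rw [join_tags_alt]
    simp [gspec, h, ih]

-- ===== VERDICT (by name: the statement is the Claim_ definition above) =====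
theorem join_tags_spec : Claim_equal_join_tags := by
  intro tags _
  unfold Spec_join_tags join_tags
  rw [alt_eq_gspec]
  simpa using joinA_eq_gspec tags [] []
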